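-- pv_equiv track=rewrite | github.com/OM234/Discrete-Math-FSA-Assignment-2 | PA2Part3.py | isEquivalent
-- ===== SOURCE A (Python) =====
-- def isEquivalent(state, newState, equivalenceLists, transitions, alphabet, acceptingStates):
--     resultState = []
--     resultNewState = []
--
--     if newState in acceptingStates and state not in acceptingStates:
--         return False
--     if state in acceptingStates and newState not in acceptingStates:
--         return False
--
--     for transition in transitions:
--         for symbol in alphabet:
--             if transition[0] == state and transition[1] == symbol:
--                 resultState.append(transition[2])
--             if transition[0] == newState and transition[1] == symbol:
--                 resultNewState.append(transition[2])
--
--     if resultState == resultNewState: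
--         return True
--
--     for equivalenceList in equivalenceLists:
--         stateInList = False
--         newStateInList = False
--         for state in resultState:
--             if state in equivalenceList:
--                 stateInList = True
--                 break
--         for state in resultNewState:
--             if state in equivalenceList:
--                 newStateInList = True
--                 break
--         if stateInList != newStateInList:
--             return False
--
--     return True
-- ===== SOURCE B (Python) =====
-- def isEquivalent(state, newState, equivalenceLists, transitions, alphabet, acceptingStates):
--     if newState in acceptingStates and state not in acceptingStates:
--         return False
--     if state in acceptingStates and newState not in acceptingStates:
--         return False
--     # inverted index: classified state -> set of class indices it occurs in
--     classOf = {}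
--     for i, eqList in enumerate(equivalenceLists):
--         for s in eqList:
--             classOf.setdefault(s, set()).add(i)
--     syms = set(alphabet)
--     sig1 = set()
--     sig2 = set()
--     # single pass over transitions, accumulating class signatures directly
--     for src, sym, dst in transitions:
--         if sym in syms:
--             if src == state:
--                 sig1 |= classOf.get(dst, set())
--             if src == newState:
--                 sig2 |= classOf.get(dst, set())
--     return sig1 == sig2
-- ===== Notes on version B (the rewrite author's own statement) =====
-- stated objective: faster
-- what changed: Replaces A's nested transitions-by-alphabet target-list building and per-class break-loops with a precomputed inverted index (classified state -> set of class indices) and a single pass over transitions that accumulates the two class-signature sets directly, returning their set equality (which subsumes A's early list-equality return and the per-class asymmetry loop).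
import Mathlib
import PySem

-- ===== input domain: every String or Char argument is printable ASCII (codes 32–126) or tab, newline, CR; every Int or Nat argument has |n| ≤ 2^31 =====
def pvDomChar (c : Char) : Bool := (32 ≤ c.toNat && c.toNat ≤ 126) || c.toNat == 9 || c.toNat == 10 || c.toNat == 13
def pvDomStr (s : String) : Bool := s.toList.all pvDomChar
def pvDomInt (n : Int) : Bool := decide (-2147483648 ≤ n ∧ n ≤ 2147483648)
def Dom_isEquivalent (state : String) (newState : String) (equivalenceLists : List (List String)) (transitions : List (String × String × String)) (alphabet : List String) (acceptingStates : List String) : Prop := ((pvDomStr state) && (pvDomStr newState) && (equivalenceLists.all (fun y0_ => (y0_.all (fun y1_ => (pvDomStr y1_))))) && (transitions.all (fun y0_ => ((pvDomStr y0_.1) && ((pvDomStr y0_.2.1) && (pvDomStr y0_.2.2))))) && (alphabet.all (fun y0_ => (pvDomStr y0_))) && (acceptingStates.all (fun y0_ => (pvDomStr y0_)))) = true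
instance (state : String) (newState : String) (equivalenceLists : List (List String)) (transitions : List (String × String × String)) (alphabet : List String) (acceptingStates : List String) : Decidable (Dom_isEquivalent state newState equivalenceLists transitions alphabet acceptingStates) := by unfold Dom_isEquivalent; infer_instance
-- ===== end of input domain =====

-- B replaces A's nested target-list building and per-class break loops with a precomputed
-- inverted index (state -> set of class indices) and one pass over transitions accumulating
-- the two class-signature sets, returning their set equality.


-- ===== PORT A =====
-- 'for state in resultState: if state in equivalenceList: flag = True; break'
def pvAnyIn (xs l : List String) : Bool :=
  match xs with
  | [] => false
  | x :: rest => if l.contains x then true else pvAnyIn rest l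

-- 'for equivalenceList in equivalenceLists: … if stateInList != newStateInList: return False'
def pvClassLoop (lists : List (List String)) (rs rns : List String) : Bool :=
  match lists with
  | [] => true
  | l :: rest =>
      let stateInList := pvAnyIn rs l
      let newStateInList := pvAnyIn rns l
      if stateInList != newStateInList then false else pvClassLoop rest rs rns

def isEquivalent (state : String) (newState : String) (equivalenceLists : List (List String)) (transitions : List (String × String × String)) (alphabet : List String) (acceptingStates : List String) : Bool :=
  if acceptingStates.contains newState && !(acceptingStates.contains state) then false
  else if acceptingStates.contains state && !(acceptingStates.contains newState) then false
  else
    let res := transitions.foldl (fun (acc : List String × List String) t =>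
      alphabet.foldl (fun (acc : List String × List String) symbol =>
        let acc1 := if t.1 == state && t.2.1 == symbol then (acc.1 ++ [t.2.2], acc.2) else acc
        if t.1 == newState && t.2.1 == symbol then (acc1.1, acc1.2 ++ [t.2.2]) else acc1) acc) ([], [])
    if res.1 == res.2 then true
    else pvClassLoop equivalenceLists res.1 res.2

-- ===== PORT B =====
-- 'for i, eqList in enumerate(equivalenceLists): for s in eqList: classOf.setdefault(s, set()).add(i)'
def pvClassOf (equivalenceLists : List (List String)) : PySem.Dict String (PySem.Set Int) :=
  (PySem.List.enumerate equivalenceLists 0).foldl (fun d p =>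
    p.2.foldl (fun d s => d.modify s PySem.Set.empty (fun S => PySem.Set.add S p.1)) d)
    PySem.Dict.empty

def isEquivalent_alt (state : String) (newState : String) (equivalenceLists : List (List String)) (transitions : List (String × String × String)) (alphabet : List String) (acceptingStates : List String) : Bool :=
  if acceptingStates.contains newState && !(acceptingStates.contains state) then false
  else if acceptingStates.contains state && !(acceptingStates.contains newState) then false
  else
    let classOf := pvClassOf equivalenceLists
    let syms := PySem.Set.ofList alphabet
    -- 'for src, sym, dst in transitions: if sym in syms: …  sig1 |= classOf.get(dst, set()) …'
    let sigs := transitions.foldl (fun (acc : PySem.Set Int × PySem.Set Int) t =>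
      if PySem.Set.contains syms t.2.1 then
        let acc1 := if t.1 == state then (PySem.Set.union acc.1 (classOf.getD t.2.2 PySem.Set.empty), acc.2) else acc
        if t.1 == newState then (acc1.1, PySem.Set.union acc1.2 (classOf.getD t.2.2 PySem.Set.empty)) else acc1
      else acc) (PySem.Set.empty, PySem.Set.empty)
    PySem.Set.equal sigs.1 sigs.2

-- ===== PRECONDITION & SPEC =====
def Spec_isEquivalent (state : String) (newState : String) (equivalenceLists : List (List String)) (transitions : List (String × String × String)) (alphabet : List String) (acceptingStates : List String) (out : Bool) : Prop := out = isEquivalent_alt state newState equivalenceLists transitions alphabet acceptingStates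
instance (state : String) (newState : String) (equivalenceLists : List (List String)) (transitions : List (String × String × String)) (alphabet : List String) (acceptingStates : List String) (out : Bool) : Decidable (Spec_isEquivalent state newState equivalenceLists transitions alphabet acceptingStates out) := by unfold Spec_isEquivalent; infer_instance

-- ===== CLAIM (what is proved, stated in full; the proofs are below) =====
def Claim_equal_isEquivalent : Prop := ∀ (state : String) (newState : String) (equivalenceLists : List (List String)) (transitions : List (String × String × String)) (alphabet : List String) (acceptingStates : List String), Dom_isEquivalent state newState equivalenceLists transitions alphabet acceptingStates → Spec_isEquivalent state newState equivalenceLists transitions alphabet acceptingStates (isEquivalent state newState equivalenceLists transitions alphabet acceptingStates)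

-- ===== LEMMAS AND PROOFS =====

-- semantic target predicate: x is a one-step successor of s
def pvTgt (s : String) (transitions : List (String × String × String)) (alphabet : List String) (x : String) : Prop :=
  ∃ t ∈ transitions, t.1 = s ∧ t.2.1 ∈ alphabet ∧ x = t.2.2

theorem pvAnyIn_iff (xs l : List String) : pvAnyIn xs l = true ↔ ∃ x ∈ xs, x ∈ l := by
  induction xs with
  | nil => simp [pvAnyIn]
  | cons x rest ih => by_cases h : x ∈ l <;> simp [pvAnyIn, h, ih]

theorem pvClassLoop_iff (lists : List (List String)) (rs rns : List String) :
    pvClassLoop lists rs rns = true ↔ ∀ l ∈ lists, pvAnyIn rs l = pvAnyIn rns l := by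
  induction lists with
  | nil => simp [pvClassLoop]
  | cons l rest ih =>
      by_cases h : pvAnyIn rs l = pvAnyIn rns l <;> simp [pvClassLoop, h, ih]

-- membership in the inner (alphabet) fold of A
theorem pvInnerFold_mem (state newState : String) (t : String × String × String)
    (alphabet : List String) (acc : List String × List String) (x : String) :
    (x ∈ (alphabet.foldl (fun (acc : List String × List String) symbol =>
        let acc1 := if t.1 == state && t.2.1 == symbol then (acc.1 ++ [t.2.2], acc.2) else acc
        if t.1 == newState && t.2.1 == symbol then (acc1.1, acc1.2 ++ [t.2.2]) else acc1) acc).1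
      ↔ x ∈ acc.1 ∨ (t.1 = state ∧ t.2.1 ∈ alphabet ∧ x = t.2.2)) ∧
    (x ∈ (alphabet.foldl (fun (acc : List String × List String) symbol =>
        let acc1 := if t.1 == state && t.2.1 == symbol then (acc.1 ++ [t.2.2], acc.2) else acc
        if t.1 == newState && t.2.1 == symbol then (acc1.1, acc1.2 ++ [t.2.2]) else acc1) acc).2
      ↔ x ∈ acc.2 ∨ (t.1 = newState ∧ t.2.1 ∈ alphabet ∧ x = t.2.2)) := by
  induction alphabet generalizing acc with
  | nil => simp
  | cons sym rest ih =>
      simp only [List.foldl_cons]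
      constructor
      · rw [(ih _).1]
        clear ih
        split_ifs with h1 h2 h2 <;>
          simp only [beq_iff_eq, Bool.and_eq_true] at h1 h2 <;>
          simp_all [List.mem_cons] <;> tauto
      · rw [(ih _).2]
        clear ih
        split_ifs with h1 h2 h2 <;>
          simp only [beq_iff_eq, Bool.and_eq_true] at h1 h2 <;>
          simp_all [List.mem_cons] <;> tauto

theorem pvTgt_cons (s : String) (t : String × String × String)
    (rest : List (String × String × String)) (alphabet : List String) (x : String) :
    pvTgt s (t :: rest) alphabet x ↔
      (t.1 = s ∧ t.2.1 ∈ alphabet ∧ x = t.2.2) ∨ pvTgt s rest alphabet x := by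
  simp [pvTgt]

-- membership in the outer (transitions) fold of A
theorem pvFold_mem (state newState : String) (transitions : List (String × String × String))
    (alphabet : List String) (acc : List String × List String) (x : String) :
    (x ∈ (transitions.foldl (fun (acc : List String × List String) t =>
        alphabet.foldl (fun (acc : List String × List String) symbol =>
          let acc1 := if t.1 == state && t.2.1 == symbol then (acc.1 ++ [t.2.2], acc.2) else acc
          if t.1 == newState && t.2.1 == symbol then (acc1.1, acc1.2 ++ [t.2.2]) else acc1) acc) acc).1
      ↔ x ∈ acc.1 ∨ pvTgt state transitions alphabet x) ∧
    (x ∈ (transitions.foldl (fun (acc : List String × List String) t =>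
        alphabet.foldl (fun (acc : List String × List String) symbol =>
          let acc1 := if t.1 == state && t.2.1 == symbol then (acc.1 ++ [t.2.2], acc.2) else acc
          if t.1 == newState && t.2.1 == symbol then (acc1.1, acc1.2 ++ [t.2.2]) else acc1) acc) acc).2
      ↔ x ∈ acc.2 ∨ pvTgt newState transitions alphabet x) := by
  induction transitions generalizing acc with
  | nil => simp [pvTgt]
  | cons t rest ih =>
      simp only [List.foldl_cons]
      constructor
      · rw [(ih _).1, (pvInnerFold_mem state newState t alphabet acc x).1,
          pvTgt_cons]
        tauto
      · rw [(ih _).2, (pvInnerFold_mem state newState t alphabet acc x).2,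
          pvTgt_cons]
        tauto

-- one row of the inverted-index build: adding index j for every state of xs
theorem pvClassOfRow_mem (xs : List String) (j : Int)
    (d : PySem.Dict String (PySem.Set Int)) (s : String) (i : Int) :
    i ∈ (xs.foldl (fun d x => d.modify x PySem.Set.empty (fun S => PySem.Set.add S j)) d).getD s PySem.Set.empty
      ↔ i ∈ d.getD s PySem.Set.empty ∨ (i = j ∧ s ∈ xs) := by
  induction xs generalizing d with
  | nil => simp
  | cons x rest ih =>
      simp only [List.foldl_cons]
      rw [ih, PySem.Dict.getD_modify]
      by_cases hs : s = x
      · subst hs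
        rw [if_pos rfl]
        simp only [PySem.Set.mem_add, List.mem_cons]
        tauto
      · simp only [if_neg hs, List.mem_cons]
        tauto

-- the inverted index over a list of (index, class) rows
theorem pvClassOfFold_mem (ps : List (Int × List String))
    (d : PySem.Dict String (PySem.Set Int)) (s : String) (i : Int) :
    i ∈ (ps.foldl (fun d p =>
        p.2.foldl (fun d x => d.modify x PySem.Set.empty (fun S => PySem.Set.add S p.1)) d) d).getD s PySem.Set.empty
      ↔ i ∈ d.getD s PySem.Set.empty ∨ ∃ p ∈ ps, i = p.1 ∧ s ∈ p.2 := by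
  induction ps generalizing d with
  | nil => simp
  | cons p rest ih =>
      simp only [List.foldl_cons]
      rw [ih, pvClassOfRow_mem]
      simp only [List.mem_cons]
      constructor
      · rintro (( h | h) | ⟨q, hq, h⟩)
        · exact Or.inl h
        · exact Or.inr ⟨p, Or.inl rfl, h⟩
        · exact Or.inr ⟨q, Or.inr hq, h⟩
      · rintro (h | ⟨q, (rfl | hq), h⟩)
        · exact Or.inl (Or.inl h)
        · exact Or.inl (Or.inr h)
        · exact Or.inr ⟨q, hq, h⟩

theorem pvClassOf_mem (lists : List (List String)) (s : String) (i : Int) :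
    i ∈ (pvClassOf lists).getD s PySem.Set.empty
      ↔ ∃ (k : Nat) (hk : k < lists.length), i = (k : Int) ∧ s ∈ lists[k] := by
  unfold pvClassOf
  rw [pvClassOfFold_mem, PySem.Dict.getD_empty]
  constructor
  · rintro (h | ⟨p, hp, h1, h2⟩)
    · simp [PySem.Set.empty] at h
    · rw [PySem.List.mem_enumerate_iff] at hp
      rcases hp with ⟨k, hk, rfl⟩
      exact ⟨k, hk, by simpa using h1, h2⟩
  · rintro ⟨k, hk, rfl, h⟩
    refine Or.inr ⟨((0 : Int) + (k : Int), lists[k]), ?_, by simp, h⟩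
    rw [PySem.List.mem_enumerate_iff]
    exact ⟨k, hk, rfl⟩

-- membership in B's signature accumulator fold
theorem pvSigFold_mem (state newState : String) (transitions : List (String × String × String))
    (syms : PySem.Set String) (classOf : PySem.Dict String (PySem.Set Int))
    (acc : PySem.Set Int × PySem.Set Int) (i : Int) :
    (i ∈ (transitions.foldl (fun (acc : PySem.Set Int × PySem.Set Int) t =>
        if PySem.Set.contains syms t.2.1 then
          let acc1 := if t.1 == state then (PySem.Set.union acc.1 (classOf.getD t.2.2 PySem.Set.empty), acc.2) else acc
          if t.1 == newState then (acc1.1, PySem.Set.union acc1.2 (classOf.getD t.2.2 PySem.Set.empty)) else acc1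
        else acc) acc).1
      ↔ i ∈ acc.1 ∨ ∃ t ∈ transitions, t.2.1 ∈ syms ∧ t.1 = state ∧ i ∈ classOf.getD t.2.2 PySem.Set.empty) ∧
    (i ∈ (transitions.foldl (fun (acc : PySem.Set Int × PySem.Set Int) t =>
        if PySem.Set.contains syms t.2.1 then
          let acc1 := if t.1 == state then (PySem.Set.union acc.1 (classOf.getD t.2.2 PySem.Set.empty), acc.2) else acc
          if t.1 == newState then (acc1.1, PySem.Set.union acc1.2 (classOf.getD t.2.2 PySem.Set.empty)) else acc1
        else acc) acc).2
      ↔ i ∈ acc.2 ∨ ∃ t ∈ transitions, t.2.1 ∈ syms ∧ t.1 = newState ∧ i ∈ classOf.getD t.2.2 PySem.Set.empty) := by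
  induction transitions generalizing acc with
  | nil => simp
  | cons t rest ih =>
      simp only [List.foldl_cons, List.mem_cons]
      constructor
      · rw [(ih _).1]
        split_ifs with h1 h2 h3 h2 <;>
          simp only [beq_iff_eq] at * <;>
          simp_all [PySem.Set.mem_union] <;> tauto
      · rw [(ih _).2]
        split_ifs with h1 h2 h3 h2 <;>
          simp only [beq_iff_eq] at * <;>
          simp_all [PySem.Set.mem_union] <;> tauto

-- ===== VERDICT (by name: the statement is the Claim_ definition above) =====
theorem isEquivalent_spec : Claim_equal_isEquivalent := by
  intro state newState equivalenceLists transitions alphabet acceptingStates _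
  unfold Spec_isEquivalent isEquivalent isEquivalent_alt
  set res := transitions.foldl (fun (acc : List String × List String) t =>
      alphabet.foldl (fun (acc : List String × List String) symbol =>
        let acc1 := if t.1 == state && t.2.1 == symbol then (acc.1 ++ [t.2.2], acc.2) else acc
        if t.1 == newState && t.2.1 == symbol then (acc1.1, acc1.2 ++ [t.2.2]) else acc1) acc) ([], []) with hres
  have hm1 : ∀ x, x ∈ res.1 ↔ pvTgt state transitions alphabet x := by
    intro x
    rw [hres, (pvFold_mem state newState transitions alphabet ([], []) x).1]
    simp
  have hm2 : ∀ x, x ∈ res.2 ↔ pvTgt newState transitions alphabet x := by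
    intro x
    rw [hres, (pvFold_mem state newState transitions alphabet ([], []) x).2]
    simp
  set sigs := transitions.foldl (fun (acc : PySem.Set Int × PySem.Set Int) t =>
      if PySem.Set.contains (PySem.Set.ofList alphabet) t.2.1 then
        let acc1 := if t.1 == state then (PySem.Set.union acc.1 ((pvClassOf equivalenceLists).getD t.2.2 PySem.Set.empty), acc.2) else acc
        if t.1 == newState then (acc1.1, PySem.Set.union acc1.2 ((pvClassOf equivalenceLists).getD t.2.2 PySem.Set.empty)) else acc1
      else acc) (PySem.Set.empty, PySem.Set.empty) with hsigs
  -- signature membership, in semantic terms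
  have hs1 : ∀ i : Int, i ∈ sigs.1 ↔
      ∃ (k : Nat) (hk : k < equivalenceLists.length), i = (k : Int) ∧
        ∃ x, pvTgt state transitions alphabet x ∧ x ∈ equivalenceLists[k] := by
    intro i
    rw [hsigs, (pvSigFold_mem state newState transitions (PySem.Set.ofList alphabet)
      (pvClassOf equivalenceLists) (PySem.Set.empty, PySem.Set.empty) i).1]
    simp only [PySem.Set.mem_ofList, pvClassOf_mem]
    constructor
    · rintro (h | ⟨t, ht, ha, hst, k, hk, rfl, hm⟩)
      · cases h
      · exact ⟨k, hk, rfl, t.2.2, ⟨t, ht, hst, ha, rfl⟩, hm⟩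
    · rintro ⟨k, hk, rfl, x, ⟨t, ht, hst, ha, rfl⟩, hm⟩
      exact Or.inr ⟨t, ht, ha, hst, k, hk, rfl, hm⟩
  have hs2 : ∀ i : Int, i ∈ sigs.2 ↔
      ∃ (k : Nat) (hk : k < equivalenceLists.length), i = (k : Int) ∧
        ∃ x, pvTgt newState transitions alphabet x ∧ x ∈ equivalenceLists[k] := by
    intro i
    rw [hsigs, (pvSigFold_mem state newState transitions (PySem.Set.ofList alphabet)
      (pvClassOf equivalenceLists) (PySem.Set.empty, PySem.Set.empty) i).2]
    simp only [PySem.Set.mem_ofList, pvClassOf_mem]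
    constructor
    · rintro (h | ⟨t, ht, ha, hst, k, hk, rfl, hm⟩)
      · cases h
      · exact ⟨k, hk, rfl, t.2.2, ⟨t, ht, hst, ha, rfl⟩, hm⟩
    · rintro ⟨k, hk, rfl, x, ⟨t, ht, hst, ha, rfl⟩, hm⟩
      exact Or.inr ⟨t, ht, ha, hst, k, hk, rfl, hm⟩
  -- signature equality ↔ per-class presence equivalence
  have hsigeq : PySem.Set.equal sigs.1 sigs.2 = true ↔
      ∀ l ∈ equivalenceLists,
        ((∃ x, pvTgt state transitions alphabet x ∧ x ∈ l) ↔
         (∃ x, pvTgt newState transitions alphabet x ∧ x ∈ l)) := by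
    rw [PySem.Set.equal_iff]
    constructor
    · intro h l hl
      rcases List.mem_iff_getElem.mp hl with ⟨k, hk, rfl⟩
      have hk' := h (k : Int)
      rw [hs1, hs2] at hk'
      constructor
      · intro hp
        rcases hk'.mp ⟨k, hk, rfl, hp⟩ with ⟨k', hk'', hkk, hp'⟩
        have hkeq : k' = k := by exact_mod_cast hkk.symm
        subst hkeq; exact hp'
      · intro hp
        rcases hk'.mpr ⟨k, hk, rfl, hp⟩ with ⟨k', hk'', hkk, hp'⟩
        have hkeq : k' = k := by exact_mod_cast hkk.symm
        subst hkeq; exact hp'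
    · intro h i
      rw [hs1, hs2]
      constructor
      · rintro ⟨k, hk, rfl, hp⟩
        exact ⟨k, hk, rfl, (h equivalenceLists[k] (List.getElem_mem hk)).mp hp⟩
      · rintro ⟨k, hk, rfl, hp⟩
        exact ⟨k, hk, rfl, (h equivalenceLists[k] (List.getElem_mem hk)).mpr hp⟩
  split_ifs with h1 h2
  · rfl
  · rfl
  · show (if res.1 == res.2 then true else pvClassLoop equivalenceLists res.1 res.2) =
      PySem.Set.equal sigs.1 sigs.2
    by_cases hre : res.1 = res.2
    · rw [if_pos (by simp [hre] : (res.1 == res.2) = true)]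
      symm
      rw [hsigeq]
      intro l _
      constructor
      · rintro ⟨x, hx, hxl⟩; exact ⟨x, (hm2 x).mp (hre ▸ (hm1 x).mpr hx), hxl⟩
      · rintro ⟨x, hx, hxl⟩; exact ⟨x, (hm1 x).mp (hre ▸ (hm2 x).mpr hx), hxl⟩
    · rw [if_neg (by simp [hre] : ¬ ((res.1 == res.2) = true))]
      apply Bool.coe_iff_coe.mp
      rw [pvClassLoop_iff, hsigeq]
      constructor
      · intro h l hl
        have hiff : (∃ x ∈ res.1, x ∈ l) ↔ (∃ x ∈ res.2, x ∈ l) := by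
          rw [← pvAnyIn_iff, ← pvAnyIn_iff, h l hl]
        constructor
        · rintro ⟨x, hx, hxl⟩
          rcases hiff.mp ⟨x, (hm1 x).mpr hx, hxl⟩ with ⟨y, hy, hyl⟩
          exact ⟨y, (hm2 y).mp hy, hyl⟩
        · rintro ⟨x, hx, hxl⟩
          rcases hiff.mpr ⟨x, (hm2 x).mpr hx, hxl⟩ with ⟨y, hy, hyl⟩
          exact ⟨y, (hm1 y).mp hy, hyl⟩
      · intro h l hl
        have hh := h l hl
        apply Bool.coe_iff_coe.mp
        rw [pvAnyIn_iff, pvAnyIn_iff]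
        constructor
        · rintro ⟨x, hx, hxl⟩
          rcases hh.mp ⟨x, (hm1 x).mp hx, hxl⟩ with ⟨y, hy, hyl⟩
          exact ⟨y, (hm2 y).mpr hy, hyl⟩
        · rintro ⟨x, hx, hxl⟩
          rcases hh.mpr ⟨x, (hm2 x).mp hx, hxl⟩ with ⟨y, hy, hyl⟩
          exact ⟨y, (hm1 y).mpr hy, hyl⟩
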